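-- pv_equiv track=rewrite | github.com/ashandhiscode/advent-of-code-2021 | day8.py | get_quantity_dictionary
-- ===== SOURCE A (Python) =====
-- def convert_from_length_if_known(length):
--     map_dict = {2: 1, 4: 4, 3: 7, 7: 8}
--     if length in map_dict:
--         return map_dict.get(length)
--     else:
--         return None
--
-- def get_quantity_dictionary(output_list):
--     quantity_dict = {1: 0, 4: 0, 7: 0, 8: 0}
--     output_lengths = [list(map(len, output)) for output in output_list]
--     output_values = [list(map(convert_from_length_if_known, lengths)) for lengths in output_lengths]
--     for output in output_values:
--         for num in [1, 4, 7, 8]: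
--             quantity_dict[num] += output.count(num)
--     return quantity_dict
-- ===== SOURCE B (Python) =====
-- def get_quantity_dictionary(output_list):
--     quantity_dict = {1: 0, 4: 0, 7: 0, 8: 0}
--     length_to_digit = {2: 1, 4: 4, 3: 7, 7: 8}
--     for output in output_list:
--         for segment in output:
--             digit = length_to_digit.get(len(segment))
--             if digit is not None:
--                 quantity_dict[digit] += 1
--     return quantity_dict
-- ===== Notes on version B (the rewrite author's own statement) =====
-- stated objective: simpler
-- what changed: Replaces the two intermediate mapped tables (lengths and converted values) and the four-fold .count scan per group with a single per-segment pass that maps each segment length to its digit and increments the tally directly.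
import Mathlib
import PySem

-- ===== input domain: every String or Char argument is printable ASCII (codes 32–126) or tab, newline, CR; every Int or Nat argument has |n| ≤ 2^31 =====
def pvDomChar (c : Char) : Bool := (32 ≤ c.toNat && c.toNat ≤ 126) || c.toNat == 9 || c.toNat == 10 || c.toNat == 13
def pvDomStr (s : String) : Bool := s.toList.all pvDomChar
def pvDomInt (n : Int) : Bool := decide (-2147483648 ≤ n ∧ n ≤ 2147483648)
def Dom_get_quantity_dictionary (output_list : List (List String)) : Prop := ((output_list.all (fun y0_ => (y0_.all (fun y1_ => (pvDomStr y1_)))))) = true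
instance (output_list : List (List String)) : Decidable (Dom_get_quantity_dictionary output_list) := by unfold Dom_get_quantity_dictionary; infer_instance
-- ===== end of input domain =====

-- B replaces A's two intermediate mapped tables and four .count scans per group with one
-- direct per-segment tally (objective: simpler).

-- ===== PORT A =====
def convert_from_length_if_known (length : Int) : Option Int :=
  let map_dict : PySem.Dict Int Int := PySem.Dict.ofList [(2, 1), (4, 4), (3, 7), (7, 8)]
  if map_dict.contains length then map_dict.get? length else none

def get_quantity_dictionary (output_list : List (List String)) : List (Int × Int) :=
  let quantity_dict : PySem.Dict Int Int := PySem.Dict.ofList [(1, 0), (4, 0), (7, 0), (8, 0)]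
  let output_lengths := output_list.map (fun output => output.map (fun s => PySem.Str.len s))
  let output_values := output_lengths.map (fun lengths => lengths.map convert_from_length_if_known)
  let final := output_values.foldl (fun d output =>
    ([1, 4, 7, 8] : List Int).foldl
      (fun d num => d.modify num 0 (· + (PySem.List.count output (some num) : Int))) d) quantity_dict
  final.items

-- ===== PORT B =====
def get_quantity_dictionary_alt (output_list : List (List String)) : List (Int × Int) :=
  let quantity_dict : PySem.Dict Int Int := PySem.Dict.ofList [(1, 0), (4, 0), (7, 0), (8, 0)]
  let length_to_digit : PySem.Dict Int Int := PySem.Dict.ofList [(2, 1), (4, 4), (3, 7), (7, 8)]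
  let final := output_list.foldl (fun d output =>
    output.foldl (fun d segment =>
      match length_to_digit.get? (PySem.Str.len segment) with
      | some digit => d.modify digit 0 (· + 1)
      | none => d) d) quantity_dict
  final.items

-- ===== PRECONDITION & SPEC =====
def Spec_get_quantity_dictionary (output_list : List (List String)) (out : List (Int × Int)) : Prop := out = get_quantity_dictionary_alt output_list
instance (output_list : List (List String)) (out : List (Int × Int)) : Decidable (Spec_get_quantity_dictionary output_list out) := by unfold Spec_get_quantity_dictionary; infer_instance

-- ===== CLAIM (what is proved, stated in full; the proofs are below) =====
def Claim_equal_get_quantity_dictionary : Prop := ∀ (output_list : List (List String)), Dom_get_quantity_dictionary output_list → Spec_get_quantity_dictionary output_list (get_quantity_dictionary output_list)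

-- ===== LEMMAS AND PROOFS =====

/-- The tally dict, which always keeps the shape `{1: a, 4: b, 7: c, 8: e}`. -/
def Qd (a b c e : Int) : PySem.Dict Int Int := PySem.Dict.mk [(1, a), (4, b), (7, c), (8, e)]

/-- Number of segments of `out` whose length is `k`. -/
def cnt (k : Int) (out : List String) : Nat := out.countP (fun s => PySem.Str.len s == k)

lemma cnt_cons (k : Int) (s : String) (out : List String) :
    cnt k (s :: out) = cnt k out + (if PySem.Str.len s == k then 1 else 0) := by
  simp [cnt, List.countP_cons]

lemma ltd_get? (L : Int) :
    (PySem.Dict.ofList [((2 : Int), (1 : Int)), (4, 4), (3, 7), (7, 8)]).get? L =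
      if L = 2 then some 1 else if L = 4 then some 4 else if L = 3 then some 7
      else if L = 7 then some 8 else none := by
  rw [show (PySem.Dict.ofList [((2 : Int), (1 : Int)), (4, 4), (3, 7), (7, 8)])
        = PySem.Dict.mk [(2, 1), (4, 4), (3, 7), (7, 8)] from by decide]
  have hnil : (PySem.Dict.mk ([] : List (Int × Int))).get? L = none := by
    simp [PySem.Dict.get?]
  simp only [PySem.Dict.get?_mk_cons, hnil, beq_iff_eq]
  split_ifs <;> first | rfl | (exfalso; omega)

lemma conv_eq (L : Int) :
    convert_from_length_if_known L =
      if L = 2 then some 1 else if L = 4 then some 4 else if L = 3 then some 7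
      else if L = 7 then some 8 else none := by
  unfold convert_from_length_if_known
  dsimp only
  rw [PySem.Dict.contains_eq_isSome_get?, ltd_get?]
  split_ifs <;> first | rfl | simp_all

lemma count_eq_cnt (out : List String) (n k : Int)
    (h : ∀ L : Int, convert_from_length_if_known L = some n ↔ L = k) :
    PySem.List.count (out.map (fun s => convert_from_length_if_known (PySem.Str.len s))) (some n)
      = cnt k out := by
  simp only [PySem.List.count_eq, List.count, List.countP_map, cnt]
  apply List.countP_congr
  intro s _
  simpa using h (PySem.Str.len s)

lemma A_group (out : List String) (a b c e : Int) :
    ([1, 4, 7, 8] : List Int).foldl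
      (fun d num => d.modify num 0
        (· + (PySem.List.count (out.map (fun s => convert_from_length_if_known (PySem.Str.len s))) (some num) : Int)))
      (Qd a b c e)
    = Qd (a + cnt 2 out) (b + cnt 4 out) (c + cnt 3 out) (e + cnt 7 out) := by
  have h1 := count_eq_cnt out 1 2 (by intro L; rw [conv_eq]; split_ifs <;> simp_all)
  have h4 := count_eq_cnt out 4 4 (by intro L; rw [conv_eq]; split_ifs <;> simp_all)
  have h7 := count_eq_cnt out 7 3 (by intro L; rw [conv_eq]; split_ifs <;> simp_all)
  have h8 := count_eq_cnt out 8 7 (by intro L; rw [conv_eq]; split_ifs <;> simp_all)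
  simp only [PySem.List.count_eq, PySem.Str.len_eq, String.length_toList] at h1 h4 h7 h8
  simp [List.foldl, h1, h4, h7, h8, Qd, PySem.Dict.modify, PySem.Dict.getD, PySem.Dict.get?,
    PySem.Dict.insert, PySem.Dict.contains, List.find?]

lemma Qd_modify_1 (a b c e : Int) (f : Int → Int) :
    (Qd a b c e).modify 1 0 f = Qd (f a) b c e := by
  simp [Qd, PySem.Dict.modify, PySem.Dict.getD, PySem.Dict.get?, PySem.Dict.insert,
    PySem.Dict.contains]

lemma Qd_modify_4 (a b c e : Int) (f : Int → Int) :
    (Qd a b c e).modify 4 0 f = Qd a (f b) c e := by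
  simp [Qd, PySem.Dict.modify, PySem.Dict.getD, PySem.Dict.get?, PySem.Dict.insert,
    PySem.Dict.contains]

lemma Qd_modify_7 (a b c e : Int) (f : Int → Int) :
    (Qd a b c e).modify 7 0 f = Qd a b (f c) e := by
  simp [Qd, PySem.Dict.modify, PySem.Dict.getD, PySem.Dict.get?, PySem.Dict.insert,
    PySem.Dict.contains]

lemma Qd_modify_8 (a b c e : Int) (f : Int → Int) :
    (Qd a b c e).modify 8 0 f = Qd a b c (f e) := by
  simp [Qd, PySem.Dict.modify, PySem.Dict.getD, PySem.Dict.get?, PySem.Dict.insert,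
    PySem.Dict.contains]

lemma B_group (out : List String) (a b c e : Int) :
    out.foldl (fun d segment =>
      match (PySem.Dict.ofList [((2 : Int), (1 : Int)), (4, 4), (3, 7), (7, 8)]).get? (PySem.Str.len segment) with
      | some digit => d.modify digit 0 (· + 1)
      | none => d) (Qd a b c e)
    = Qd (a + cnt 2 out) (b + cnt 4 out) (c + cnt 3 out) (e + cnt 7 out) := by
  induction out generalizing a b c e with
  | nil => simp [cnt]
  | cons s rest ih =>
    simp only [List.foldl_cons]
    simp only [cnt_cons]
    by_cases h2 : PySem.Str.len s = 2
    · simp only [h2, show (PySem.Dict.ofList [((2 : Int), (1 : Int)), (4, 4), (3, 7), (7, 8)]).get? (2 : Int)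
          = some 1 from by decide, Qd_modify_1, ih]
      simp [Qd]
      omega
    · by_cases h4 : PySem.Str.len s = 4
      · simp only [h4, show (PySem.Dict.ofList [((2 : Int), (1 : Int)), (4, 4), (3, 7), (7, 8)]).get? (4 : Int)
            = some 4 from by decide, Qd_modify_4, ih]
        simp [Qd]
        omega
      · by_cases h3 : PySem.Str.len s = 3
        · simp only [h3, show (PySem.Dict.ofList [((2 : Int), (1 : Int)), (4, 4), (3, 7), (7, 8)]).get? (3 : Int)
              = some 7 from by decide, Qd_modify_7, ih]
          simp [Qd]
          omega
        · by_cases h7 : PySem.Str.len s = 7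
          · simp only [h7, show (PySem.Dict.ofList [((2 : Int), (1 : Int)), (4, 4), (3, 7), (7, 8)]).get? (7 : Int)
                = some 8 from by decide, Qd_modify_8, ih]
            simp [Qd]
            omega
          · simp only [PySem.Str.len_eq, String.length_toList] at h2 h4 h3 h7
            have hnone : (PySem.Dict.ofList [((2 : Int), (1 : Int)), (4, 4), (3, 7), (7, 8)]).get?
                (PySem.Str.len s) = none := by rw [ltd_get?]; simp [h2, h4, h3, h7]
            simp only [hnone, ih]
            simp [Qd, h2, h4, h3, h7]

lemma main_fold (l : List (List String)) (a b c e : Int) :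
    ((l.map (fun output => output.map (fun s => PySem.Str.len s))).map
        (fun lengths => lengths.map convert_from_length_if_known)).foldl
      (fun d output => ([1, 4, 7, 8] : List Int).foldl
        (fun d num => d.modify num 0 (· + (PySem.List.count output (some num) : Int))) d)
      (Qd a b c e)
    = l.foldl (fun d output =>
        output.foldl (fun d segment =>
          match (PySem.Dict.ofList [((2 : Int), (1 : Int)), (4, 4), (3, 7), (7, 8)]).get? (PySem.Str.len segment) with
          | some digit => d.modify digit 0 (· + 1)
          | none => d) d) (Qd a b c e) := by
  simp only [List.map_map, List.foldl_map, Function.comp_def]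
  set fA := fun (d : PySem.Dict Int Int) (output : List String) =>
    ([1, 4, 7, 8] : List Int).foldl (fun d num => d.modify num 0
      (· + (PySem.List.count (output.map (fun s => convert_from_length_if_known (PySem.Str.len s))) (some num) : Int))) d
    with hfA
  set fB := fun (d : PySem.Dict Int Int) (output : List String) =>
    output.foldl (fun d segment =>
      match (PySem.Dict.ofList [((2 : Int), (1 : Int)), (4, 4), (3, 7), (7, 8)]).get? (PySem.Str.len segment) with
      | some digit => d.modify digit 0 (· + 1)
      | none => d) d
    with hfB
  induction l generalizing a b c e with
  | nil => rfl
  | cons out rest ih =>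
    rw [List.foldl_cons, List.foldl_cons]
    have hA : fA (Qd a b c e) out
        = Qd (a + cnt 2 out) (b + cnt 4 out) (c + cnt 3 out) (e + cnt 7 out) := by
      rw [hfA]; exact A_group out a b c e
    have hB : fB (Qd a b c e) out
        = Qd (a + cnt 2 out) (b + cnt 4 out) (c + cnt 3 out) (e + cnt 7 out) := by
      rw [hfB]; exact B_group out a b c e
    rw [hA, hB]
    exact ih _ _ _ _

-- ===== VERDICT (by name: the statement is the Claim_ definition above) =====
theorem get_quantity_dictionary_spec : Claim_equal_get_quantity_dictionary := by
  intro output_list _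
  show get_quantity_dictionary output_list = get_quantity_dictionary_alt output_list
  unfold get_quantity_dictionary get_quantity_dictionary_alt
  have h0 : PySem.Dict.ofList [((1 : Int), (0 : Int)), (4, 0), (7, 0), (8, 0)] = Qd 0 0 0 0 := by decide
  simp only [h0]
  exact congrArg PySem.Dict.items (main_fold output_list 0 0 0 0)
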